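-- pv_equiv track=rewrite | github.com/Griger5/pite_project | src/AI_dio/data_preprocessing/build_manifest.py | _cap_rows
-- ===== SOURCE A (Python) =====
-- from typing import Callable, Iterable, Optional
--
-- def _cap_rows(rows: list[dict], max_per_split: Optional[int]) -> list[dict]:
--     if not max_per_split or max_per_split <= 0:
--         return rows
--     by_split = {"train": [], "val": [], "test": []}
--     for r in rows:
--         s = r["split"]
--         if s in by_split:
--             if len(by_split[s]) < max_per_split:
--                 by_split[s].append(r)
--     return by_split["train"] + by_split["val"] + by_split["test"]
-- ===== SOURCE B (Python) =====
-- def _cap_rows(rows: list[dict], max_per_split):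
--     if not max_per_split or max_per_split <= 0:
--         return rows
--     return [
--         r
--         for s in ("train", "val", "test")
--         for r in [r for r in rows if r["split"] == s][:max_per_split]
--     ]
-- ===== Notes on version B (the rewrite author's own statement) =====
-- stated objective: simpler
-- what changed: Replaces A's single-pass mutable bucket dict (guarded appends into by_split, then concatenating its three values) with one flat comprehension that, for each split name in order, filters the rows for that split and slices off the first max_per_split of them.
import Mathlib
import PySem

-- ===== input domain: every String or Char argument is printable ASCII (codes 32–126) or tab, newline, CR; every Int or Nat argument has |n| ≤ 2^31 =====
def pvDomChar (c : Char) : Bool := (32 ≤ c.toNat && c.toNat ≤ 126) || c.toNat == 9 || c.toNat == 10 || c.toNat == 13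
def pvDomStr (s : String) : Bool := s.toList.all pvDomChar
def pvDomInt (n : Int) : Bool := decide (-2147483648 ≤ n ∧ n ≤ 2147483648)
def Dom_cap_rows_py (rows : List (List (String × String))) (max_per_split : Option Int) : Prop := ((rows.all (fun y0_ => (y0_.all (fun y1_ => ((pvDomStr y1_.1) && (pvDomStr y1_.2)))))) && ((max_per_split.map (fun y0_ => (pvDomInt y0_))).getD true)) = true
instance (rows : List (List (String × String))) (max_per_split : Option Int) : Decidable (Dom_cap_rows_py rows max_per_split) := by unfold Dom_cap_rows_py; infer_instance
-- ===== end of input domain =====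

-- B replaces A's mutable bucket dict with one flat per-split filter-and-take comprehension ("simpler").


-- ===== PORT A =====
-- one loop iteration: s = r["split"]; if s in by_split and len(by_split[s]) < max: by_split[s].append(r)
-- (r["split"] ported as getD with default "": the KeyError case is excluded by Pre_cap_rows_py)
def capStepA (k : Int) (d : PySem.Dict String (List (List (String × String)))) (r : List (String × String)) : PySem.Dict String (List (List (String × String))) :=
  let s := (PySem.Dict.mk r).getD "split" ""
  if d.contains s then
    if ((d.getD s []).length : Int) < k then d.modify s [] (· ++ [r]) else d
  else d

def cap_rows_py (rows : List (List (String × String))) (max_per_split : Option Int) : List (List (String × String)) :=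
  match max_per_split with
  | none => rows                         -- 'not max_per_split' (None)
  | some k =>
    if k ≤ 0 then rows                   -- 'not max_per_split' (0) or 'max_per_split <= 0'
    else
      let d := rows.foldl (capStepA k) (PySem.Dict.mk [("train", []), ("val", []), ("test", [])])
      d.getD "train" [] ++ d.getD "val" [] ++ d.getD "test" []

-- ===== PORT B =====
-- [r for s in ("train","val","test") for r in [r for r in rows if r["split"] == s][:max_per_split]]
-- (the slice [:k] with k > 0 is List.take k.toNat; r["split"] as getD "" — KeyError excluded by Pre_)
def cap_rows_py_alt (rows : List (List (String × String))) (max_per_split : Option Int) : List (List (String × String)) :=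
  match max_per_split with
  | none => rows
  | some k =>
    if k ≤ 0 then rows
    else
      (["train", "val", "test"]).flatMap (fun s =>
        (rows.filter (fun r => (PySem.Dict.mk r).getD "split" "" == s)).take k.toNat)

-- ===== PRECONDITION & SPEC =====
-- Pre_ excludes exactly the inputs where Python A raises KeyError: the cap is active (a positive int)
-- and some row dict lacks the key "split".
def Pre_cap_rows_py (rows : List (List (String × String))) (max_per_split : Option Int) : Prop :=
  max_per_split.getD 0 ≤ 0 ∨
  ∀ r ∈ rows, ((PySem.Dict.mk r).get? "split").isSome
instance (rows : List (List (String × String))) (max_per_split : Option Int) : Decidable (Pre_cap_rows_py rows max_per_split) := by unfold Pre_cap_rows_py; infer_instance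

def pvWitness_cap_rows_py : (List (List (String × String))) × Option Int :=
  ([[("split", "train"), ("id", "1")], [("split", "val")], [("split", "train")]], some 1)

def Spec_cap_rows_py (rows : List (List (String × String))) (max_per_split : Option Int) (out : List (List (String × String))) : Prop := out = cap_rows_py_alt rows max_per_split
instance (rows : List (List (String × String))) (max_per_split : Option Int) (out : List (List (String × String))) : Decidable (Spec_cap_rows_py rows max_per_split out) := by unfold Spec_cap_rows_py; infer_instance

-- ===== CLAIM (what is proved, stated in full; the proofs are below) =====
def Claim_equal_cap_rows_py : Prop := ∀ (rows : List (List (String × String))) (max_per_split : Option Int), Dom_cap_rows_py rows max_per_split → Pre_cap_rows_py rows max_per_split → Spec_cap_rows_py rows max_per_split (cap_rows_py rows max_per_split)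

-- ===== LEMMAS AND PROOFS =====

-- the per-split selection B performs
def capSel (s : String) (rows : List (List (String × String))) : List (List (String × String)) :=
  rows.filter (fun r => (PySem.Dict.mk r).getD "split" "" == s)

-- the bucket-fold of A, from arbitrary bucket contents, equals the filtered-and-capped lists
lemma cap_fold (k : Int) (hk : 0 < k) (rows : List (List (String × String))) :
    ∀ t v te : List (List (String × String)),
    rows.foldl (capStepA k) (PySem.Dict.mk [("train", t), ("val", v), ("test", te)])
      = PySem.Dict.mk [("train", t ++ (capSel "train" rows).take (k.toNat - t.length)),
                       ("val",   v ++ (capSel "val" rows).take (k.toNat - v.length)),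
                       ("test",  te ++ (capSel "test" rows).take (k.toNat - te.length))] := by
  induction rows with
  | nil => intro t v te; simp [capSel]
  | cons r rest ih =>
    intro t v te
    rw [List.foldl_cons]
    by_cases h1 : (PySem.Dict.mk r).getD "split" "" = "train"
    · by_cases hlen : ((t.length : Int) < k)
      · have hstep : capStepA k (PySem.Dict.mk [("train", t), ("val", v), ("test", te)]) r
            = PySem.Dict.mk [("train", t ++ [r]), ("val", v), ("test", te)] := by
          simp only [capStepA]
          rw [h1]
          simp [hlen, PySem.Dict.modify, PySem.Dict.insert,
                PySem.Dict.getD, PySem.Dict.get?, PySem.Dict.contains]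
        have hsel : capSel "train" (r :: rest) = r :: capSel "train" rest := by
          simp only [capSel, List.filter_cons]
          rw [h1]
          simp
        have hsel2 : ∀ x : String, x ≠ "train" → capSel x (r :: rest) = capSel x rest := by
          intro x hx
          simp only [capSel, List.filter_cons]
          rw [h1]
          simp [Ne.symm hx]
        rw [hstep, ih, hsel, hsel2 "val" (by decide), hsel2 "test" (by decide)]
        have ht : k.toNat - t.length = (k.toNat - (t ++ [r]).length) + 1 := by
          simp only [List.length_append, List.length_cons, List.length_nil]; omega
        rw [ht, List.take_succ_cons]
        simp
      · have hstep : capStepA k (PySem.Dict.mk [("train", t), ("val", v), ("test", te)]) r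
            = PySem.Dict.mk [("train", t), ("val", v), ("test", te)] := by
          simp only [capStepA]
          rw [h1]
          simp [hlen, PySem.Dict.getD, PySem.Dict.get?, PySem.Dict.contains]
        have hsel : capSel "train" (r :: rest) = r :: capSel "train" rest := by
          simp only [capSel, List.filter_cons]
          rw [h1]
          simp
        have hsel2 : ∀ x : String, x ≠ "train" → capSel x (r :: rest) = capSel x rest := by
          intro x hx
          simp only [capSel, List.filter_cons]
          rw [h1]
          simp [Ne.symm hx]
        have ht : k.toNat - t.length = 0 := by omega
        rw [hstep, ih, hsel, hsel2 "val" (by decide), hsel2 "test" (by decide), ht]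
        simp
    · by_cases h2 : (PySem.Dict.mk r).getD "split" "" = "val"
      · by_cases hlen : ((v.length : Int) < k)
        · have hstep : capStepA k (PySem.Dict.mk [("train", t), ("val", v), ("test", te)]) r
              = PySem.Dict.mk [("train", t), ("val", v ++ [r]), ("test", te)] := by
            simp only [capStepA]
            rw [h2]
            simp [hlen, PySem.Dict.modify, PySem.Dict.insert,
                  PySem.Dict.getD, PySem.Dict.get?, PySem.Dict.contains]
          have hsel : capSel "val" (r :: rest) = r :: capSel "val" rest := by
            simp only [capSel, List.filter_cons]
            rw [h2]
            simp
          have hsel2 : ∀ x : String, x ≠ "val" → capSel x (r :: rest) = capSel x rest := by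
            intro x hx
            simp only [capSel, List.filter_cons]
            rw [h2]
            simp [Ne.symm hx]
          rw [hstep, ih, hsel, hsel2 "train" (by decide), hsel2 "test" (by decide)]
          have ht : k.toNat - v.length = (k.toNat - (v ++ [r]).length) + 1 := by
            simp only [List.length_append, List.length_cons, List.length_nil]; omega
          rw [ht, List.take_succ_cons]
          simp
        · have hstep : capStepA k (PySem.Dict.mk [("train", t), ("val", v), ("test", te)]) r
              = PySem.Dict.mk [("train", t), ("val", v), ("test", te)] := by
            simp only [capStepA]
            rw [h2]
            simp [hlen, PySem.Dict.getD, PySem.Dict.get?, PySem.Dict.contains]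
          have hsel : capSel "val" (r :: rest) = r :: capSel "val" rest := by
            simp only [capSel, List.filter_cons]
            rw [h2]
            simp
          have hsel2 : ∀ x : String, x ≠ "val" → capSel x (r :: rest) = capSel x rest := by
            intro x hx
            simp only [capSel, List.filter_cons]
            rw [h2]
            simp [Ne.symm hx]
          have ht : k.toNat - v.length = 0 := by omega
          rw [hstep, ih, hsel, hsel2 "train" (by decide), hsel2 "test" (by decide), ht]
          simp
      · by_cases h3 : (PySem.Dict.mk r).getD "split" "" = "test"
        · by_cases hlen : ((te.length : Int) < k)
          · have hstep : capStepA k (PySem.Dict.mk [("train", t), ("val", v), ("test", te)]) r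
                = PySem.Dict.mk [("train", t), ("val", v), ("test", te ++ [r])] := by
              simp only [capStepA]
              rw [h3]
              simp [hlen, PySem.Dict.modify, PySem.Dict.insert,
                    PySem.Dict.getD, PySem.Dict.get?, PySem.Dict.contains]
            have hsel : capSel "test" (r :: rest) = r :: capSel "test" rest := by
              simp only [capSel, List.filter_cons]
              rw [h3]
              simp
            have hsel2 : ∀ x : String, x ≠ "test" → capSel x (r :: rest) = capSel x rest := by
              intro x hx
              simp only [capSel, List.filter_cons]
              rw [h3]
              simp [Ne.symm hx]
            rw [hstep, ih, hsel, hsel2 "train" (by decide), hsel2 "val" (by decide)]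
            have ht : k.toNat - te.length = (k.toNat - (te ++ [r]).length) + 1 := by
              simp only [List.length_append, List.length_cons, List.length_nil]; omega
            rw [ht, List.take_succ_cons]
            simp
          · have hstep : capStepA k (PySem.Dict.mk [("train", t), ("val", v), ("test", te)]) r
                = PySem.Dict.mk [("train", t), ("val", v), ("test", te)] := by
              simp only [capStepA]
              rw [h3]
              simp [hlen, PySem.Dict.getD, PySem.Dict.get?, PySem.Dict.contains]
            have hsel : capSel "test" (r :: rest) = r :: capSel "test" rest := by
              simp only [capSel, List.filter_cons]
              rw [h3]
              simp
            have hsel2 : ∀ x : String, x ≠ "test" → capSel x (r :: rest) = capSel x rest := by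
              intro x hx
              simp only [capSel, List.filter_cons]
              rw [h3]
              simp [Ne.symm hx]
            have ht : k.toNat - te.length = 0 := by omega
            rw [hstep, ih, hsel, hsel2 "train" (by decide), hsel2 "val" (by decide), ht]
            simp
        · have hc : (PySem.Dict.mk [("train", t), ("val", v), ("test", te)]).contains
                ((PySem.Dict.mk r).getD "split" "") = false := by
            simp [PySem.Dict.contains]
            exact ⟨fun h => h1 h.symm, fun h => h2 h.symm, fun h => h3 h.symm⟩
          have hstep : capStepA k (PySem.Dict.mk [("train", t), ("val", v), ("test", te)]) r
              = PySem.Dict.mk [("train", t), ("val", v), ("test", te)] := by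
            simp only [capStepA]
            rw [hc]
            simp
          have hsel2 : ∀ x ∈ (["train", "val", "test"] : List String), capSel x (r :: rest) = capSel x rest := by
            intro x hx
            fin_cases hx <;> · simp only [capSel, List.filter_cons]
                               simp [h1, h2, h3]
          rw [hstep, ih, hsel2 "train" (by decide), hsel2 "val" (by decide), hsel2 "test" (by decide)]

theorem cap_rows_py_spec : Claim_equal_cap_rows_py := by
  intro rows m _ _
  unfold Spec_cap_rows_py cap_rows_py cap_rows_py_alt
  match m with
  | none => rfl
  | some k =>
    by_cases hk : k ≤ 0
    · simp [hk]
    · simp only [if_neg hk]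
      rw [cap_fold k (by omega) rows [] [] []]
      simp [capSel, PySem.Dict.getD, PySem.Dict.get?, List.flatMap]
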